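-- pv_equiv track=rewrite | github.com/Deepakchandhru/platoon_FYP | python_platoon/sumo_zkp.py | _find_free_platoon_index
-- ===== SOURCE A (Python) =====
-- from typing import Dict, Optional, List, Tuple
--
-- PLATOON_COUNT = 2
--
-- def _find_free_platoon_index(pids_map: Dict[int, Optional[str]], vid_platoon_index_map: Dict[str,int], present_ids: List[str]) -> int:
--     for i in range(PLATOON_COUNT):
--         has = False
--         for v in present_ids:
--             if vid_platoon_index_map.get(v) == i:
--                 has = True
--                 break
--         if not has:
--             return i
--
--     max_idx = max(list(pids_map.keys()) or [PLATOON_COUNT-1])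
--     return max_idx + 1
-- ===== SOURCE B (Python) =====
-- PLATOON_COUNT = 2
--
-- def _find_free_platoon_index(pids_map, vid_platoon_index_map, present_ids):
--     # Candidate elimination: start with all platoon indices, strike out each
--     # used one in a single pass over present_ids (stopping early when none
--     # survive); the first survivor (list stays sorted) is the answer.
--     cands = list(range(PLATOON_COUNT))
--     for v in present_ids:
--         if not cands:
--             break
--         i = vid_platoon_index_map.get(v)
--         cands = [c for c in cands if c != i]
--     if cands:
--         return cands[0]
--     return max(list(pids_map.keys()) or [PLATOON_COUNT - 1]) + 1
-- ===== Notes on version B (the rewrite author's own statement) =====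
-- stated objective: alternative
-- what changed: A searches per platoon index, rescanning present_ids for each; B inverts the traversal: it keeps a sorted list of candidate indices and eliminates the index used by each present vehicle in one pass over present_ids (with early exit once no candidate survives), returning the first survivor; the fallback line is the same.
import Mathlib
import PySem

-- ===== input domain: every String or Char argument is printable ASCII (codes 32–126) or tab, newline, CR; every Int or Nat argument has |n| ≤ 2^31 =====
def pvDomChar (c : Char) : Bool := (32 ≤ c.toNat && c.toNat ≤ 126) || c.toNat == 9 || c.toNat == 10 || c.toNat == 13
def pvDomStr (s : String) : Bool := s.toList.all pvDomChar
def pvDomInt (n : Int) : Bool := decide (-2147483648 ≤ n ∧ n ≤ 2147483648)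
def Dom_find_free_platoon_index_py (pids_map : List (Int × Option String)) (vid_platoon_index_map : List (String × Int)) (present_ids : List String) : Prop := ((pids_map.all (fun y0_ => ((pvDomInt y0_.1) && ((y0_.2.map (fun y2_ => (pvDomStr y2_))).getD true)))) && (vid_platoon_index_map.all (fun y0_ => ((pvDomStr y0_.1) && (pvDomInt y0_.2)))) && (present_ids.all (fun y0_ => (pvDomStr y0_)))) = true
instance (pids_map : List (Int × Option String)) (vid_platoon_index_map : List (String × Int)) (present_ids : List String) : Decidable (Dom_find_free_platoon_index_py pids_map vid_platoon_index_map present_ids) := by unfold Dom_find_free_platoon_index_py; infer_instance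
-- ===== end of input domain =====

-- ===== PORT A =====
-- B replaces A's per-index rescan of present_ids by candidate elimination:
-- one pass over present_ids striking used indices from a candidate list (objective: alternative).

-- inner 'for v in present_ids: if vid_platoon_index_map.get(v) == i: has = True; break'
def pvA_scan (m : PySem.Dict String Int) (present : List String) (i : Int) : Bool :=
  match present with
  | [] => false
  | v :: rest => if m.get? v = some i then true else pvA_scan m rest i

-- outer 'for i in range(PLATOON_COUNT): ... if not has: return i'
def pvA_loop (m : PySem.Dict String Int) (present : List String) : List Int → Option Int
  | [] => none
  | i :: rest => if pvA_scan m present i then pvA_loop m present rest else some i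

def find_free_platoon_index_py (pids_map : List (Int × Option String)) (vid_platoon_index_map : List (String × Int)) (present_ids : List String) : Int :=
  match pvA_loop (PySem.Dict.mk vid_platoon_index_map) present_ids (PySem.List.pyRange 0 2 1) with
  | some i => i
  | none =>
      -- max(list(pids_map.keys()) or [PLATOON_COUNT-1]) + 1; the list fed to max is
      -- never empty, so the .getD 0 default is never used
      let ks := (PySem.Dict.mk pids_map).keys
      let lst := if ks = [] then [(1 : Int)] else ks
      (PySem.List.max? lst (fun x => x)).getD 0 + 1

-- ===== PORT B =====
-- 'for v in present_ids: if not cands: break; cands = [c for c in cands if c != i]'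
-- (Python 'c != i' with i : Optional[int] is True when i is None, so keep c iff get v ≠ some c)
def pvB_elim (m : PySem.Dict String Int) (cands : List Int) : List String → List Int
  | [] => cands
  | v :: rest =>
      if cands = [] then cands
      else pvB_elim m (cands.filter (fun c => !(m.get? v == some c))) rest

def find_free_platoon_index_py_alt (pids_map : List (Int × Option String)) (vid_platoon_index_map : List (String × Int)) (present_ids : List String) : Int :=
  match pvB_elim (PySem.Dict.mk vid_platoon_index_map) (PySem.List.pyRange 0 2 1) present_ids with
  | c :: _ => c
  | [] =>
      -- identical fallback line to A's Python (shared verbatim in both sources)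
      let ks := (PySem.Dict.mk pids_map).keys
      let lst := if ks = [] then [(1 : Int)] else ks
      (PySem.List.max? lst (fun x => x)).getD 0 + 1

-- ===== PRECONDITION & SPEC =====
def Spec_find_free_platoon_index_py (pids_map : List (Int × Option String)) (vid_platoon_index_map : List (String × Int)) (present_ids : List String) (out : Int) : Prop := out = find_free_platoon_index_py_alt pids_map vid_platoon_index_map present_ids
instance (pids_map : List (Int × Option String)) (vid_platoon_index_map : List (String × Int)) (present_ids : List String) (out : Int) : Decidable (Spec_find_free_platoon_index_py pids_map vid_platoon_index_map present_ids out) := by unfold Spec_find_free_platoon_index_py; infer_instance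

-- ===== CLAIM =====
def Claim_equal_find_free_platoon_index_py : Prop := ∀ (pids_map : List (Int × Option String)) (vid_platoon_index_map : List (String × Int)) (present_ids : List String), Dom_find_free_platoon_index_py pids_map vid_platoon_index_map present_ids → Spec_find_free_platoon_index_py pids_map vid_platoon_index_map present_ids (find_free_platoon_index_py pids_map vid_platoon_index_map present_ids)

-- ===== LEMMAS AND PROOFS =====

-- B's elimination over present_ids keeps exactly the candidates A's inner scan rejects
theorem pvB_elim_eq_filter (m : PySem.Dict String Int) (present : List String) :
    ∀ cands : List Int, pvB_elim m cands present = cands.filter (fun c => !(pvA_scan m present c)) := by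
  induction present with
  | nil => intro cands; simp [pvB_elim, pvA_scan]
  | cons v rest ih =>
      intro cands
      by_cases hc : cands = []
      · simp [pvB_elim, hc]
      · rw [pvB_elim, if_neg hc, ih, List.filter_filter]
        apply List.filter_congr
        intro c _
        simp only [pvA_scan]
        by_cases h : m.get? v = some c
        · simp [h]
        · simp [h]

-- ===== VERDICT (by name: the statement is the Claim_ definition above) =====
theorem find_free_platoon_index_py_spec : Claim_equal_find_free_platoon_index_py := by
  intro pids_map vid_platoon_index_map present_ids _hdom
  unfold Spec_find_free_platoon_index_py
  unfold find_free_platoon_index_py find_free_platoon_index_py_alt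
  rw [pvB_elim_eq_filter]
  have hr : PySem.List.pyRange 0 2 1 = [(0 : Int), 1] := by decide
  rw [hr]
  cases h0 : pvA_scan (PySem.Dict.mk vid_platoon_index_map) present_ids 0 <;>
  cases h1 : pvA_scan (PySem.Dict.mk vid_platoon_index_map) present_ids 1 <;>
    simp [pvA_loop, h0, h1, List.filter]
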